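-- pv_equiv track=rewrite | github.com/Meidori/Discrete_Mathematics_Labs_2024-2025 | sem_1/lab_3/main.py | get_PCNF
-- ===== SOURCE A (Python) =====
-- def get_PCNF(table):
--     size = len(table)
--     false_rows = []
--     for i in range(1, len(table[size - 1])):
--         if table[size - 1][i] == 0:
--             column_values = [row[i] for row in table[:-1]]
--             false_rows.append(column_values)
--
--     return false_rows
-- ===== SOURCE B (Python) =====
-- def get_PCNF(table):
--     last = table[len(table) - 1]
--     sel = [i for i in range(1, len(last)) if last[i] == 0]
--     acc = [[] for _ in sel]
--     for row in table[:-1]: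
--         for a, i in zip(acc, sel):
--             a.append(row[i])
--     return acc
-- ===== Notes on version B (the rewrite author's own statement) =====
-- stated objective: alternative
-- what changed: A loops over column indices and, for each selected column, re-scans all rows with an inner comprehension; B first computes the selected indices once, then makes a single row-major pass over table[:-1], appending into per-column accumulator lists (loop nest transposed, different maintained state).
import Mathlib
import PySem

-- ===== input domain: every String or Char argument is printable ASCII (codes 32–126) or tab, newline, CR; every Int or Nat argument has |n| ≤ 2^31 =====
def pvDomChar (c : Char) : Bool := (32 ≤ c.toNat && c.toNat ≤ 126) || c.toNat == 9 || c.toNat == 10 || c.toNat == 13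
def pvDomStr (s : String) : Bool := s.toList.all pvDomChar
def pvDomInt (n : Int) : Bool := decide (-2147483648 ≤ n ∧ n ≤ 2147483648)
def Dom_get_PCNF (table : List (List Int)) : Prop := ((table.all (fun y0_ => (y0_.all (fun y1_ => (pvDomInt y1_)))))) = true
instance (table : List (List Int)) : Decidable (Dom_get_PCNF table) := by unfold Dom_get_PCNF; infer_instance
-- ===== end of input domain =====

-- B computes the selected column indices once and then makes a single row-major pass
-- over table[:-1], appending into per-column accumulators, instead of A's
-- column-major re-scan of all rows per selected index (objective: alternative; same cost).

-- ===== PORT A =====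
def get_PCNF (table : List (List Int)) : List (List Int) :=
  (PySem.List.pyRange 1
      ((((PySem.List.pyGet? table ((table.length : Int) - 1)).getD []).length : Int)) 1).foldl
    (fun false_rows i =>
      if ((PySem.List.pyGet? ((PySem.List.pyGet? table ((table.length : Int) - 1)).getD []) i).getD 1
            == 0) then
        false_rows ++
          [(PySem.List.slice table none (some (-1))).map
             (fun row => (PySem.List.pyGet? row i).getD 0)]
      else false_rows) []

-- ===== PORT B =====
def get_PCNF_alt (table : List (List Int)) : List (List Int) :=
  let last := (PySem.List.pyGet? table ((table.length : Int) - 1)).getD []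
  let sel := (PySem.List.pyRange 1 ((last.length : Nat) : Int) 1).filter
    (fun i => (PySem.List.pyGet? last i).getD 1 == 0)
  let acc := sel.map (fun _ => ([] : List Int))
  (PySem.List.slice table none (some (-1))).foldl
    (fun acc row =>
      (acc.zip sel).map (fun p => p.1 ++ [(PySem.List.pyGet? row p.2).getD 0]))
    acc

-- ===== PRECONDITION & SPEC =====
-- Pre_ excludes exactly the inputs where the Python A raises IndexError: the empty
-- table, and tables where some zero entry of the last row sits at a column index
-- missing from an earlier (shorter) row.  B raises there too.
def Pre_get_PCNF (table : List (List Int)) : Prop :=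
  table ≠ [] ∧
    ∀ i < (table.getLastD []).length,
      1 ≤ i → (table.getLastD []).getD i 1 = 0 →
        ∀ row ∈ table.dropLast, i < row.length
instance (table : List (List Int)) : Decidable (Pre_get_PCNF table) := by
  unfold Pre_get_PCNF; infer_instance

def pvWitness_get_PCNF : List (List Int) := [[1, 0], [0, 0]]

def Spec_get_PCNF (table : List (List Int)) (out : List (List Int)) : Prop := out = get_PCNF_alt table
instance (table : List (List Int)) (out : List (List Int)) : Decidable (Spec_get_PCNF table out) := by unfold Spec_get_PCNF; infer_instance

-- ===== CLAIM (what is proved, stated in full; the proofs are below) =====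
def Claim_equal_get_PCNF : Prop := ∀ (table : List (List Int)), Dom_get_PCNF table → Pre_get_PCNF table → Spec_get_PCNF table (get_PCNF table)

-- ===== LEMMAS AND PROOFS =====

-- A's value, normalized to a filter/map over Nat indices
theorem pv_A_norm (table : List (List Int)) :
    get_PCNF table =
      ((List.range ((((PySem.List.pyGet? table ((table.length : Int) - 1)).getD []).length) - 1)).filter
          (fun k => (((PySem.List.pyGet? table ((table.length : Int) - 1)).getD [])[k + 1]?.getD 1 == 0))).map
        (fun k => table.dropLast.map (fun row => (row[k + 1]?).getD 0)) := by
  rw [get_PCNF, PySem.List.foldl_append_if, PySem.List.slice_to_neg_one,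
    PySem.List.pyRange_one]
  set last := (PySem.List.pyGet? table ((table.length : Int) - 1)).getD [] with hl
  have hb : ((last.length : Int) - 1).toNat = last.length - 1 := by omega
  rw [hb, List.filter_map, List.map_map, List.nil_append]
  have hcast : ∀ k : Nat, (1 : Int) + (k : Int) = ((k + 1 : Nat) : Int) := fun k => by
    push_cast; ring
  congr 1
  · funext k
    simp only [Function.comp, hcast k, PySem.List.pyGet?_natCast]
  · congr 1
    funext k
    simp only [Function.comp, hcast k, PySem.List.pyGet?_natCast]

-- the row-major accumulation over per-column lists equals one column map per index
theorem pv_fold_cols :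
    ∀ (rows : List (List Int)) (sel : List Int) (g : Int → List Int),
      rows.foldl
        (fun acc row =>
          (acc.zip sel).map (fun p => p.1 ++ [(PySem.List.pyGet? row p.2).getD 0]))
        (sel.map g)
      = sel.map (fun i => g i ++ rows.map (fun row => (PySem.List.pyGet? row i).getD 0))
  | [], sel, g => by simp
  | row :: rows, sel, g => by
    have hz : (sel.map g).zip sel = sel.map (fun i => (g i, i)) := by
      simpa using List.zip_map' (f := g) (g := id) (l := sel)
    simp only [List.foldl_cons, hz, List.map_map]
    rw [show ((fun p : List Int × Int => p.1 ++ [(PySem.List.pyGet? row p.2).getD 0]) ∘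
          fun i => (g i, i))
        = (fun i => g i ++ [(PySem.List.pyGet? row i).getD 0]) from rfl,
      pv_fold_cols rows sel (fun i => g i ++ [(PySem.List.pyGet? row i).getD 0])]
    simp [List.append_assoc]

-- B's value, normalized to the same filter/map over Nat indices
theorem pv_B_norm (table : List (List Int)) :
    get_PCNF_alt table =
      ((List.range ((((PySem.List.pyGet? table ((table.length : Int) - 1)).getD []).length) - 1)).filter
          (fun k => (((PySem.List.pyGet? table ((table.length : Int) - 1)).getD [])[k + 1]?.getD 1 == 0))).map
        (fun k => table.dropLast.map (fun row => (row[k + 1]?).getD 0)) := by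
  simp only [get_PCNF_alt]
  set last := (PySem.List.pyGet? table ((table.length : Int) - 1)).getD [] with hl
  rw [pv_fold_cols, PySem.List.slice_to_neg_one, PySem.List.pyRange_one]
  have hb : ((last.length : Int) - 1).toNat = last.length - 1 := by omega
  rw [hb, List.filter_map, List.map_map]
  have hc1 : ∀ k : Nat, ((1 : Int) + (k : Int)) = ((k + 1 : Nat) : Int) := fun k => by
    push_cast; ring
  congr 1
  · funext k
    simp only [Function.comp, hc1 k, PySem.List.pyGet?_natCast, List.nil_append]
  · congr 1
    funext k
    simp only [Function.comp, hc1 k, PySem.List.pyGet?_natCast]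

-- ===== VERDICT (by name: the statement is the Claim_ definition above) =====
theorem get_PCNF_spec : Claim_equal_get_PCNF := by
  intro table _ _
  unfold Spec_get_PCNF
  rw [pv_A_norm table, pv_B_norm table]
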